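-- pv_equiv track=rewrite | github.com/ivanyu199012/testPractice | 완료/[1차]_뉴스_클러스터링.py | get_keyword_by
-- ===== SOURCE A (Python) =====
-- def get_keyword_by( s ):
--
-- 	keyword_list = []
-- 	char_list = list( s )
-- 	while len( char_list ) > 1:
-- 		first_char = char_list.pop( 0 )
-- 		if first_char.isalpha() and char_list[ 0 ].isalpha():
-- 			keyword_list.append( ( first_char + char_list[ 0 ] ).upper() )
--
-- 	return keyword_list
-- ===== SOURCE B (Python) =====
-- def get_keyword_by(s):
--     # tokenize into maximal alphabetic runs, then emit adjacent bigrams per run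
--     runs = []
--     cur = []
--     for ch in s:
--         if ch.isalpha():
--             cur.append(ch)
--         else:
--             if cur:
--                 runs.append(''.join(cur))
--             cur = []
--     if cur:
--         runs.append(''.join(cur))
--     keyword_list = []
--     for run in runs:
--         for a, b in zip(run, run[1:]):
--             keyword_list.append((a + b).upper())
--     return keyword_list
-- ===== Notes on version B (the rewrite author's own statement) =====
-- stated objective: faster
-- what changed: B tokenizes the string into maximal alphabetic runs in one pass and then emits the adjacent bigrams of each run, instead of A's while loop that pops the head of a char list (an O(n) pop) and tests each adjacent pair.
import Mathlib
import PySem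

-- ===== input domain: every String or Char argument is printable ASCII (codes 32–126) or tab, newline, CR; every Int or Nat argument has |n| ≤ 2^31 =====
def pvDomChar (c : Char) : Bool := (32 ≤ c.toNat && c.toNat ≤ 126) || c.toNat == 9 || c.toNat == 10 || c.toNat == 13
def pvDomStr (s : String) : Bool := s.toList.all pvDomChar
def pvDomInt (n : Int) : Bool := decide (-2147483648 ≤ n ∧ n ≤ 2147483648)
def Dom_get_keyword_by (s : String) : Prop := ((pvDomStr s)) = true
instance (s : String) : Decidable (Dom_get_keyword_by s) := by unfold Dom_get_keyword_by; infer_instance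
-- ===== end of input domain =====

-- B tokenizes the string into maximal alphabetic runs and emits each run's adjacent
-- bigrams, replacing A's while loop that pops the head of the char list each step.

-- (first_char + char_list[0]).upper(), shared by both ports
def pvUp (c0 c1 : Char) : String := String.mk (PySem.Chars.upper [c0, c1])

-- ===== PORT A =====
-- the while loop: char_list.pop(0) then test the new head
def pvLoopA : List Char → List String → List String
  | c0 :: c1 :: rest, acc =>
      pvLoopA (c1 :: rest)
        (if PySem.Chars.isalpha c0 && PySem.Chars.isalpha c1 then acc ++ [pvUp c0 c1] else acc)
  | _, acc => acc

def get_keyword_by (s : String) : List String := pvLoopA s.toList []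

-- ===== PORT B =====
-- first pass: maximal alphabetic runs (cur is the current run)
def pvRuns : List Char → List Char → List (List Char)
  | [], cur => if cur.isEmpty then [] else [cur]
  | c :: rest, cur =>
      if PySem.Chars.isalpha c then pvRuns rest (cur ++ [c])
      else (if cur.isEmpty then [] else [cur]) ++ pvRuns rest []

-- second pass: zip(run, run[1:]) bigrams of one run
def pvEmit (run : List Char) : List String :=
  (run.zip run.tail).map (fun p => pvUp p.1 p.2)

def get_keyword_by_alt (s : String) : List String :=
  (pvRuns s.toList []).flatMap pvEmit

-- ===== PRECONDITION & SPEC =====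
def Spec_get_keyword_by (s : String) (out : List String) : Prop := out = get_keyword_by_alt s
instance (s : String) (out : List String) : Decidable (Spec_get_keyword_by s out) := by unfold Spec_get_keyword_by; infer_instance

-- ===== CLAIM (what is proved, stated in full; the proofs are below) =====
def Claim_equal_get_keyword_by : Prop := ∀ (s : String), Dom_get_keyword_by s → Spec_get_keyword_by s (get_keyword_by s)

-- ===== LEMMAS AND PROOFS =====

-- reference: the bigrams of a char list (A's result, accumulator removed)
def pvBig : List Char → List String
  | c0 :: c1 :: rest =>
      (if PySem.Chars.isalpha c0 && PySem.Chars.isalpha c1 then [pvUp c0 c1] else []) ++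
        pvBig (c1 :: rest)
  | _ => []

-- bigrams with an optional pending alphabetic character on the left
def pvGx : Option Char → List Char → List String
  | _, [] => []
  | o, c :: rest =>
      if PySem.Chars.isalpha c then
        (match o with | some p => [pvUp p c] | none => []) ++ pvGx (some c) rest
      else pvGx none rest

theorem pvLoopA_eq (l : List Char) : ∀ acc, pvLoopA l acc = acc ++ pvBig l := by
  induction l with
  | nil => intro acc; simp [pvLoopA, pvBig]
  | cons c0 rest ih =>
    intro acc
    cases rest with
    | nil => simp [pvLoopA, pvBig]
    | cons c1 rest' =>
      rw [pvLoopA, ih]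
      by_cases h : (PySem.Chars.isalpha c0 && PySem.Chars.isalpha c1) = true <;>
        simp [pvBig, h]

theorem pvBig_cons_not {c : Char} (l : List Char)
    (h : PySem.Chars.isalpha c = false) : pvBig (c :: l) = pvBig l := by
  cases l <;> simp [pvBig, h]

theorem pvBig_eq_pvGx (l : List Char) :
    pvBig l = pvGx none l ∧
      ∀ c, PySem.Chars.isalpha c = true → pvBig (c :: l) = pvGx (some c) l := by
  induction l with
  | nil =>
    refine ⟨rfl, fun c _ => ?_⟩
    simp [pvBig, pvGx]
  | cons c1 rest ih =>
    obtain ⟨ih1, ih2⟩ := ih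
    by_cases h1 : PySem.Chars.isalpha c1 = true
    · refine ⟨?_, fun c hc => ?_⟩
      · rw [pvGx]; simp only [h1, if_true]
        simpa using ih2 c1 h1
      · rw [pvGx]; simp only [h1, if_true]
        cases rest with
        | nil => simp [pvBig, hc, h1, pvGx]
        | cons c2 r => rw [pvBig]; simp [hc, h1, ← ih2 c1 h1, pvBig]
    · have h1' : PySem.Chars.isalpha c1 = false := by simpa using h1
      refine ⟨?_, fun c hc => ?_⟩
      · rw [pvGx]; simp only [h1', if_false, Bool.false_eq_true]
        rw [pvBig_cons_not rest h1', ih1]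
      · rw [pvGx]; simp only [h1', if_false, Bool.false_eq_true]
        rw [pvBig, ih1.symm, pvBig_cons_not rest h1']
        simp [h1']

theorem pvEmit_cons_cons (a b : Char) (r : List Char) :
    pvEmit (a :: b :: r) = pvUp a b :: pvEmit (b :: r) := by
  simp [pvEmit]

theorem pvEmit_append_one (cur : List Char) (c : Char) :
    pvEmit (cur ++ [c]) =
      pvEmit cur ++ (match cur.getLast? with | some p => [pvUp p c] | none => []) := by
  induction cur with
  | nil => simp [pvEmit]
  | cons a cur' ih =>
    cases cur' with
    | nil => simp [pvEmit]
    | cons b cur'' =>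
      have : (a :: b :: cur'') ++ [c] = a :: b :: (cur'' ++ [c]) := by simp
      rw [this, pvEmit_cons_cons, show b :: (cur'' ++ [c]) = (b :: cur'') ++ [c] by simp, ih,
        pvEmit_cons_cons]
      simp [List.getLast?]

theorem pvGx_cons (o : Option Char) (c : Char) (rest : List Char) :
    pvGx o (c :: rest) =
      if PySem.Chars.isalpha c then
        (match o with | some p => [pvUp p c] | none => []) ++ pvGx (some c) rest
      else pvGx none rest := by
  rw [pvGx.eq_def]

theorem pvRuns_eq (l : List Char) :
    ∀ cur, (∀ c ∈ cur, PySem.Chars.isalpha c = true) →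
      (pvRuns l cur).flatMap pvEmit = pvEmit cur ++ pvGx cur.getLast? l := by
  induction l with
  | nil =>
    intro cur _
    rw [pvRuns, pvGx]
    cases cur <;> simp [pvEmit]
  | cons c rest ih =>
    intro cur hcur
    by_cases h : PySem.Chars.isalpha c = true
    · have hall : ∀ x ∈ cur ++ [c], PySem.Chars.isalpha x = true := by
        intro x hx
        rcases List.mem_append.mp hx with hx | hx
        · exact hcur x hx
        · simp only [List.mem_singleton] at hx; subst hx; exact h
      rw [pvRuns]; simp only [h, if_true]
      rw [ih (cur ++ [c]) hall, pvEmit_append_one, pvGx_cons]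
      simp only [h, if_true, List.getLast?_append, List.getLast?_singleton]
      cases hcl : cur.getLast? <;> simp
    · have h' : PySem.Chars.isalpha c = false := by simpa using h
      rw [pvRuns]; simp only [h', if_false, Bool.false_eq_true]
      rw [List.flatMap_append, ih [] (by simp), pvGx_cons]
      simp only [h', if_false, Bool.false_eq_true]
      cases cur <;> simp [pvEmit]

-- ===== VERDICT (by name: the statement is the Claim_ definition above) =====
theorem get_keyword_by_spec : Claim_equal_get_keyword_by := by
  intro s _
  unfold Spec_get_keyword_by get_keyword_by get_keyword_by_alt
  rw [pvLoopA_eq, pvRuns_eq s.toList [] (by simp)]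
  simp [pvEmit, (pvBig_eq_pvGx s.toList).1, List.getLast?]
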